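-- pv_equiv track=rewrite | github.com/woodstockcs/csp-class-docs | creatept/pig-final.py | find_highest_scoring_turn
-- ===== SOURCE A (Python) =====
-- def calculate_turn_score(turn_rolls):
--     """Calculate the score for a turn based on its roll history."""
--     if 1 in turn_rolls:
--         return 0
--     return sum(turn_rolls)
--
-- def find_highest_scoring_turn(rolls_history):
--     """Find the highest scoring turn and its details."""
--     if not rolls_history:
--         return 0, []
--
--     turn_scores = [calculate_turn_score(turn) for turn in rolls_history]
--     highest_score = max(turn_scores)
--     highest_turn_index = turn_scores.index(highest_score)
--     highest_turn_rolls = rolls_history[highest_turn_index]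
--
--     return highest_score, highest_turn_rolls
-- ===== SOURCE B (Python) =====
-- def find_highest_scoring_turn(rolls_history):
--     """Stable-sort the turns by descending score and take the first one."""
--     if not rolls_history:
--         return 0, []
--     ranked = sorted(rolls_history, key=lambda t: -(0 if 1 in t else sum(t)))
--     best = ranked[0]
--     return (0 if 1 in best else sum(best)), best
-- ===== Notes on version B (the rewrite author's own statement) =====
-- stated objective: alternative
-- what changed: Instead of building a score list and locating its max with max+.index, B stably sorts the turns by descending score and takes the head: stability makes the head exactly the first turn attaining the maximal score, matching max+.index's tie-breaking.
import Mathlib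
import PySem

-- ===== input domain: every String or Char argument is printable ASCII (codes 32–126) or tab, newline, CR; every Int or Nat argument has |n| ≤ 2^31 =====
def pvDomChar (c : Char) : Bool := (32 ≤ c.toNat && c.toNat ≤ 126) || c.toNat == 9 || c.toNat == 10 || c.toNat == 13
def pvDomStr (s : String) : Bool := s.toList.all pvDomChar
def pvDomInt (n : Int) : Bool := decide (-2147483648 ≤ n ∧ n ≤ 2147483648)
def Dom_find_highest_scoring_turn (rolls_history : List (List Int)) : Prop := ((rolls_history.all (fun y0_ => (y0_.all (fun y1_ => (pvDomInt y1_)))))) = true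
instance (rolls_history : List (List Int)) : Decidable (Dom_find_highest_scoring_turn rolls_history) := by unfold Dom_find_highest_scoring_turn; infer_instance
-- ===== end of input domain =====

-- B stably sorts the turns by descending score and takes the head, instead of A's scores-list + max + .index + re-index pipeline; objective: alternative.


-- ===== PORT A =====
def calculate_turn_score (turn_rolls : List Int) : Int :=
  if (1 : Int) ∈ turn_rolls then 0 else turn_rolls.sum

def find_highest_scoring_turn (rolls_history : List (List Int)) : Int × List Int :=
  if rolls_history = [] then (0, [])
  else
    let turn_scores := rolls_history.map calculate_turn_score
    match PySem.List.max? turn_scores (fun x => x) with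
    | none => (0, [])  -- unreachable: list nonempty
    | some highest_score =>
      match PySem.List.index? turn_scores highest_score with
      | none => (0, [])  -- unreachable: max is in the list
      | some highest_turn_index =>
        match PySem.List.pyGet? rolls_history (highest_turn_index : Int) with
        | none => (0, [])  -- unreachable: index valid
        | some highest_turn_rolls => (highest_score, highest_turn_rolls)

-- ===== PORT B =====
def find_highest_scoring_turn_alt (rolls_history : List (List Int)) : Int × List Int :=
  if rolls_history = [] then (0, [])
  else
    let ranked := PySem.List.sorted rolls_history
      (fun t => -(if (1 : Int) ∈ t then 0 else t.sum)) false
    match ranked with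
    | [] => (0, [])  -- unreachable: sorted of a nonempty list is nonempty
    | best :: _ => ((if (1 : Int) ∈ best then 0 else best.sum), best)

-- ===== PRECONDITION & SPEC =====
def Spec_find_highest_scoring_turn (rolls_history : List (List Int)) (out : Int × List Int) : Prop := out = find_highest_scoring_turn_alt rolls_history
instance (rolls_history : List (List Int)) (out : Int × List Int) : Decidable (Spec_find_highest_scoring_turn rolls_history out) := by unfold Spec_find_highest_scoring_turn; infer_instance

-- ===== CLAIM (what is proved, stated in full; the proofs are below) =====
def Claim_equal_find_highest_scoring_turn : Prop := ∀ (rolls_history : List (List Int)), Dom_find_highest_scoring_turn rolls_history → Spec_find_highest_scoring_turn rolls_history (find_highest_scoring_turn rolls_history)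

-- ===== LEMMAS AND PROOFS =====

-- Proof-only helper: the first turn of maximal score, as a running-best recursion.
def pvBestOf (s : Int) (t : List Int) : List (List Int) → Int × List Int
  | [] => (s, t)
  | u :: l => if calculate_turn_score u > s then pvBestOf (calculate_turn_score u) u l
              else pvBestOf s t l

-- B side: the head of the insertion-sort fold is the first turn of maximal score.
lemma pv_foldl_insert_head (l : List (List Int)) : ∀ (h0 : List Int) (rest : List (List Int)),
    ∃ r', l.foldl
        (fun acc x => PySem.List.insertBy
          (fun a b => decide ((-(if (1 : Int) ∈ a then 0 else a.sum) : Int) < -(if (1 : Int) ∈ b then 0 else b.sum))) x acc)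
        (h0 :: rest)
      = (l.foldl (fun h x => if calculate_turn_score x > calculate_turn_score h then x else h) h0) :: r' := by
  induction l with
  | nil => intro h0 rest; exact ⟨rest, rfl⟩
  | cons u l ih =>
    intro h0 rest
    simp only [List.foldl_cons, PySem.List.insertBy, calculate_turn_score]
    by_cases h : (if (1 : Int) ∈ u then (0:Int) else u.sum) > (if (1 : Int) ∈ h0 then (0:Int) else h0.sum)
    · have hb : (-(if (1 : Int) ∈ u then (0:Int) else u.sum) : Int) < -(if (1 : Int) ∈ h0 then 0 else h0.sum) := by omega
      simp only [hb, decide_true, if_true, h]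
      exact ih u (h0 :: rest)
    · have hb : ¬ ((-(if (1 : Int) ∈ u then (0:Int) else u.sum) : Int) < -(if (1 : Int) ∈ h0 then 0 else h0.sum)) := by omega
      simp only [hb, decide_false, if_false, h]
      exact ih h0 _

lemma pvBestOf_eq_headFold (l : List (List Int)) : ∀ (t : List Int),
    pvBestOf (calculate_turn_score t) t l =
      (calculate_turn_score (l.foldl (fun h x => if calculate_turn_score x > calculate_turn_score h then x else h) t),
       l.foldl (fun h x => if calculate_turn_score x > calculate_turn_score h then x else h) t) := by
  induction l with
  | nil => intro t; rfl
  | cons u l ih =>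
    intro t
    simp only [pvBestOf, List.foldl_cons]
    by_cases h : calculate_turn_score u > calculate_turn_score t
    · simp [h, ih u]
    · simp [h, ih t]

lemma pv_alt_cons (t : List Int) (l : List (List Int)) :
    find_highest_scoring_turn_alt (t :: l) = pvBestOf (calculate_turn_score t) t l := by
  unfold find_highest_scoring_turn_alt
  rw [if_neg (List.cons_ne_nil t l)]
  rw [PySem.List.sorted_eq_foldl_insertBy]
  simp only [List.foldl_cons]
  have h0 : PySem.List.insertBy
      (fun a b => decide ((-(if (1 : Int) ∈ a then 0 else a.sum) : Int) < -(if (1 : Int) ∈ b then 0 else b.sum))) t [] = [t] := by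
    simp [PySem.List.insertBy]
  rw [h0]
  obtain ⟨r', hr⟩ := pv_foldl_insert_head l t []
  rw [hr, pvBestOf_eq_headFold l t]
  simp [calculate_turn_score]

-- A side: A on a nonempty list, rewritten through max?/index?.
lemma A_cons_eq (t : List Int) (l : List (List Int)) :
    find_highest_scoring_turn (t :: l) =
      (match PySem.List.index? (calculate_turn_score t :: l.map calculate_turn_score)
          (List.foldl max (calculate_turn_score t) (l.map calculate_turn_score)) with
       | none => (0, [])
       | some i =>
         match PySem.List.pyGet? (t :: l) (i : Int) with
         | none => (0, [])
         | some r => (List.foldl max (calculate_turn_score t) (l.map calculate_turn_score), r)) := by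
  simp [find_highest_scoring_turn, PySem.List.max?_id_cons]

lemma pv_A_cons (l : List (List Int)) : ∀ (t : List Int),
    find_highest_scoring_turn (t :: l) = pvBestOf (calculate_turn_score t) t l := by
  induction l with
  | nil =>
    intro t
    rw [A_cons_eq]
    simp [pvBestOf]
  | cons u l ih =>
    intro t
    by_cases h : calculate_turn_score u > calculate_turn_score t
    · -- new head u beats t: A (t::u::l) behaves as A (u::l)
      have hmax : max (calculate_turn_score t) (calculate_turn_score u) = calculate_turn_score u :=
        max_eq_right (le_of_lt h)
      have hsM : calculate_turn_score t < List.foldl max (calculate_turn_score u) (l.map calculate_turn_score) :=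
        lt_of_lt_of_le h (PySem.List.le_foldl_max _ _).1
      have hmem : List.foldl max (calculate_turn_score u) (l.map calculate_turn_score)
          ∈ calculate_turn_score u :: l.map calculate_turn_score :=
        PySem.List.max?_mem (by rw [PySem.List.max?_id_cons])
      obtain ⟨k, hk⟩ : ∃ k, PySem.List.index? (calculate_turn_score u :: l.map calculate_turn_score)
          (List.foldl max (calculate_turn_score u) (l.map calculate_turn_score)) = some k :=
        Option.isSome_iff_exists.mp ((PySem.List.index?_isSome_iff _ _).2 hmem)
      have hidx : PySem.List.index? (calculate_turn_score t :: calculate_turn_score u :: l.map calculate_turn_score)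
          (List.foldl max (calculate_turn_score u) (l.map calculate_turn_score)) = some (k + 1) := by
        rw [PySem.List.index?_cons_of_ne _ (ne_of_lt hsM), hk]; rfl
      have hL : find_highest_scoring_turn (t :: u :: l) = find_highest_scoring_turn (u :: l) := by
        rw [A_cons_eq t (u :: l), A_cons_eq u l]
        simp only [List.map_cons, List.foldl_cons, hmax, hidx, hk, PySem.List.pyGet?_natCast]
        simp
      rw [hL, ih u]
      simp [pvBestOf, h]
    · -- head t survives: A (t::u::l) behaves as A (t::l)
      have hmax : max (calculate_turn_score t) (calculate_turn_score u) = calculate_turn_score t :=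
        max_eq_left (not_lt.mp h)
      have hsM : calculate_turn_score t ≤ List.foldl max (calculate_turn_score t) (l.map calculate_turn_score) :=
        (PySem.List.le_foldl_max _ _).1
      have hL : find_highest_scoring_turn (t :: u :: l) = find_highest_scoring_turn (t :: l) := by
        rw [A_cons_eq t (u :: l), A_cons_eq t l]
        simp only [List.map_cons, List.foldl_cons, hmax]
        rcases eq_or_lt_of_le hsM with hEq | hLt
        · rw [← hEq, PySem.List.index?_cons_self, PySem.List.index?_cons_self]
          simp
        · have hsuM : calculate_turn_score u < List.foldl max (calculate_turn_score t) (l.map calculate_turn_score) :=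
            lt_of_le_of_lt (not_lt.mp h) hLt
          have hmem : List.foldl max (calculate_turn_score t) (l.map calculate_turn_score)
              ∈ calculate_turn_score t :: l.map calculate_turn_score :=
            PySem.List.max?_mem (by rw [PySem.List.max?_id_cons])
          have hmemS : List.foldl max (calculate_turn_score t) (l.map calculate_turn_score)
              ∈ l.map calculate_turn_score := by
            rcases List.mem_cons.mp hmem with hEq' | hm
            · exact absurd hEq'.symm (ne_of_lt hLt)
            · exact hm
          obtain ⟨j, hj⟩ : ∃ j, PySem.List.index? (l.map calculate_turn_score)
              (List.foldl max (calculate_turn_score t) (l.map calculate_turn_score)) = some j :=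
            Option.isSome_iff_exists.mp ((PySem.List.index?_isSome_iff _ _).2 hmemS)
          have h1 : PySem.List.index? (calculate_turn_score t :: l.map calculate_turn_score)
              (List.foldl max (calculate_turn_score t) (l.map calculate_turn_score)) = some (j + 1) := by
            rw [PySem.List.index?_cons_of_ne _ (ne_of_lt hLt), hj]; rfl
          have h2 : PySem.List.index? (calculate_turn_score t :: calculate_turn_score u :: l.map calculate_turn_score)
              (List.foldl max (calculate_turn_score t) (l.map calculate_turn_score)) = some (j + 1 + 1) := by
            rw [PySem.List.index?_cons_of_ne _ (ne_of_lt hLt),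
                PySem.List.index?_cons_of_ne _ (ne_of_lt hsuM), hj]; rfl
          simp only [h1, h2, PySem.List.pyGet?_natCast]
          simp
      rw [hL, ih t]
      simp [pvBestOf, h]

-- ===== VERDICT =====
theorem find_highest_scoring_turn_spec : Claim_equal_find_highest_scoring_turn := by
  intro rh _
  unfold Spec_find_highest_scoring_turn
  cases rh with
  | nil => rfl
  | cons t l => rw [pv_A_cons, pv_alt_cons]
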